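-- pv_equiv track=rewrite | github.com/rickardenglund/AoC2020 | days/24/day.py | to_cube_coordinate
-- ===== SOURCE A (Python) =====
-- def to_cube_coordinate(instruction: list[str]) -> (int, int, int):
--     x, y, z = (0, 0, 0)
--     for i in instruction:
--         if i == 'e':
--             x += 1
--             y -= 1
--         elif i == 'w':
--             x -= 1
--             y += 1
--         elif i == 'nw':
--             z -= 1
--             y += 1
--         elif i == 'se':
--             z += 1
--             y -= 1
--         elif i == 'ne':
--             x += 1
--             z -= 1
--         elif i == 'sw':
--             x -= 1
--             z += 1
--         else:
--             raise Exception('invalid direction', i)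
--     return x, y, z
-- ===== SOURCE B (Python) =====
-- def to_cube_coordinate(instruction: list[str]) -> (int, int, int):
--     for i in instruction:
--         if i not in ('e', 'w', 'nw', 'se', 'ne', 'sw'):
--             raise Exception('invalid direction', i)
--     e = instruction.count('e')
--     w = instruction.count('w')
--     ne = instruction.count('ne')
--     sw = instruction.count('sw')
--     nw = instruction.count('nw')
--     se = instruction.count('se')
--     return (e - w + ne - sw, w + nw - e - se, se + sw - nw - ne)
-- ===== Notes on version B (the rewrite author's own statement) =====
-- stated objective: simpler
-- what changed: Replaces the per-element six-way branch accumulating x,y,z with a validation pass followed by six list.count calls and a closed-form computation of the coordinates from the direction counts.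
import Mathlib
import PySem

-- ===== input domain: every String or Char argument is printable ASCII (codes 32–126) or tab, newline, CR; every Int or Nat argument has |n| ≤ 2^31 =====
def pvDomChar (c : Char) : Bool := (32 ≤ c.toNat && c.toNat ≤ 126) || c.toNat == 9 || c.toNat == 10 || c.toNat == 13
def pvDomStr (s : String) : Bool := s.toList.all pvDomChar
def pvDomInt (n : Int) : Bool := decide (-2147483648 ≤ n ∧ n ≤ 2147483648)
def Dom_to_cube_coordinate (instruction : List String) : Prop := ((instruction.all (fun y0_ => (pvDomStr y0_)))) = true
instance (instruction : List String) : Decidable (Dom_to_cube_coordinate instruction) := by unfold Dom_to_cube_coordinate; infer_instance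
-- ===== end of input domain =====

-- ===== PORT A =====
-- B validates then computes the coordinates in closed form from six counts; simpler than A's six-way accumulator loop.
-- A raises Exception('invalid direction', i) on a token outside the six directions; the Option state models that, and
-- the final .getD (0,0,0) is never reached under Pre_to_cube_coordinate.
def pvGoA : List String → Int × Int × Int → Option (Int × Int × Int)
  | [], s => some s
  | i :: t, (x, y, z) =>
    if i == "e" then pvGoA t (x + 1, y - 1, z)
    else if i == "w" then pvGoA t (x - 1, y + 1, z)
    else if i == "nw" then pvGoA t (x, y + 1, z - 1)
    else if i == "se" then pvGoA t (x, y - 1, z + 1)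
    else if i == "ne" then pvGoA t (x + 1, y, z - 1)
    else if i == "sw" then pvGoA t (x - 1, y, z + 1)
    else none

def to_cube_coordinate (instruction : List String) : Int × Int × Int :=
  (pvGoA instruction (0, 0, 0)).getD (0, 0, 0)

-- ===== PORT B =====
def pvValidDir (i : String) : Bool :=
  i == "e" || i == "w" || i == "nw" || i == "se" || i == "ne" || i == "sw"

def to_cube_coordinate_alt (instruction : List String) : Int × Int × Int :=
  if instruction.all pvValidDir then
    let e : Int := PySem.List.count instruction "e"
    let w : Int := PySem.List.count instruction "w"
    let ne : Int := PySem.List.count instruction "ne"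
    let sw : Int := PySem.List.count instruction "sw"
    let nw : Int := PySem.List.count instruction "nw"
    let se : Int := PySem.List.count instruction "se"
    (e - w + ne - sw, w + nw - e - se, se + sw - nw - ne)
  else (0, 0, 0)  -- B raises here, exactly where A raises; outside Pre_to_cube_coordinate

-- ===== PRECONDITION & SPEC =====
-- Pre_ excludes exactly the inputs containing a token outside the six directions, on which A (and B) raise Exception.
def Pre_to_cube_coordinate (instruction : List String) : Prop :=
  (instruction.all pvValidDir) = true
instance (instruction : List String) : Decidable (Pre_to_cube_coordinate instruction) := by
  unfold Pre_to_cube_coordinate; infer_instance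

def pvWitness_to_cube_coordinate : List String := ["e", "se", "ne", "w", "nw", "sw", "e"]

def Spec_to_cube_coordinate (instruction : List String) (out : Int × Int × Int) : Prop := out = to_cube_coordinate_alt instruction
instance (instruction : List String) (out : Int × Int × Int) : Decidable (Spec_to_cube_coordinate instruction out) := by unfold Spec_to_cube_coordinate; infer_instance

-- ===== CLAIM (what is proved, stated in full; the proofs are below) =====
def Claim_equal_to_cube_coordinate : Prop := ∀ (instruction : List String), Dom_to_cube_coordinate instruction → Pre_to_cube_coordinate instruction → Spec_to_cube_coordinate instruction (to_cube_coordinate instruction)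

-- ===== LEMMAS AND PROOFS =====
def pvDx (l : List String) : Int :=
  (PySem.List.count l "e" : Int) - PySem.List.count l "w" + PySem.List.count l "ne" - PySem.List.count l "sw"
def pvDy (l : List String) : Int :=
  (PySem.List.count l "w" : Int) + PySem.List.count l "nw" - PySem.List.count l "e" - PySem.List.count l "se"
def pvDz (l : List String) : Int :=
  (PySem.List.count l "se" : Int) + PySem.List.count l "sw" - PySem.List.count l "nw" - PySem.List.count l "ne"

theorem pvGoA_eq (l : List String) : ∀ x y z : Int, l.all pvValidDir →
    pvGoA l (x, y, z) = some (x + pvDx l, y + pvDy l, z + pvDz l) := by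
  induction l with
  | nil => intro x y z _; simp [pvGoA, pvDx, pvDy, pvDz, PySem.List.count]
  | cons i t ih =>
    intro x y z h
    simp only [List.all_cons, Bool.and_eq_true] at h
    obtain ⟨hi, ht⟩ := h
    have hc : ∀ v : String, (PySem.List.count (i :: t) v : Int)
        = (if i == v then 1 else 0) + PySem.List.count t v := by
      intro v
      simp [PySem.List.count_eq, List.count_cons, BEq.comm]
      split_ifs <;> push_cast <;> ring
    simp only [pvValidDir, Bool.or_eq_true, beq_iff_eq] at hi
    rcases hi with (((((h | h) | h) | h) | h) | h) <;> subst h <;>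
      simp [pvGoA, ih, ht, pvDx, pvDy, pvDz, hc, Prod.ext_iff] <;> omega

-- ===== VERDICT (by name: the statement is the Claim_ definition above) =====
theorem to_cube_coordinate_spec : Claim_equal_to_cube_coordinate := by
  intro instruction _ hpre
  unfold Pre_to_cube_coordinate at hpre
  unfold Spec_to_cube_coordinate to_cube_coordinate to_cube_coordinate_alt
  rw [pvGoA_eq instruction 0 0 0 hpre]
  rw [if_pos hpre]
  simp only [Option.getD_some, zero_add]
  rfl
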